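-- pv_equiv track=rewrite | github.com/GeorgeKarlinzer/Continued-Fraction-Factorization | temp.py | is_smooth_over_prod
-- ===== SOURCE A (Python) =====
-- from math import isqrt, gcd, sqrt, log, exp, prod
--
-- def is_smooth_over_prod(n, k):
--
--     g = gcd(n, k)
--
--     while g > 1:
--         n //= g
--         while n % g == 0:
--             n //= g
--
--         if n == 1:
--             return True
--         g = gcd(n, g)
--
--     return n == 1
-- ===== SOURCE B (Python) =====
-- from math import gcd
--
-- def is_smooth_over_prod(n, k):
--     while n != 1:
--         g = gcd(n, k)
--         if g <= 1:
--             return False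
--         n //= g
--     return True
-- ===== Notes on version B (the rewrite author's own statement) =====
-- stated objective: simpler
-- what changed: A's nested loops (outer loop with a shrinking gcd state g plus an inner loop stripping all powers of g) are flattened into a single loop that recomputes g = gcd(n, k) each round and divides n by it exactly once.
import Mathlib
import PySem

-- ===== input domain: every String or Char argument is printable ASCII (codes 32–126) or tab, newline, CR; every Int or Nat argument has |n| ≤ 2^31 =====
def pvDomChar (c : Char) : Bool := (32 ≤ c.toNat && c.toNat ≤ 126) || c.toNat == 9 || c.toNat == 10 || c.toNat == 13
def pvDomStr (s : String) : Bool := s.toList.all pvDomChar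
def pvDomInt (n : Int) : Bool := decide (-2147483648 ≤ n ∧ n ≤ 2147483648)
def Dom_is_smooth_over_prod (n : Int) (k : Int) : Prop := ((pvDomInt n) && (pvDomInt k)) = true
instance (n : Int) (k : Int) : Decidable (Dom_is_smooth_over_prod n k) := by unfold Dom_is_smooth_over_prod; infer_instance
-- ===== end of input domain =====

-- B replaces A's nested loops (inner power-stripping loop plus the shrinking-gcd state g)
-- by one flat loop that recomputes gcd(n, k) each round and divides once; objective: simpler.

-- ===== PORT A =====
-- inner loop: while n % g == 0: n //= g   (fuel-bounded; the stated fuel suffices on every input A returns on)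
def pvStripA (g : Int) : Nat → Int → Int
  | 0, n => n
  | f+1, n =>
    if PySem.Int.mod n g = 0 then pvStripA g f (PySem.Int.floordiv n g) else n

-- outer loop: while g > 1: …
def pvLoopA : Nat → Int → Int → Bool
  | 0, n, _ => decide (n = 1)
  | f+1, n, g =>
    if 1 < g then
      let n2 := pvStripA g (f+1) (PySem.Int.floordiv n g)
      if n2 = 1 then true else pvLoopA f n2 ((Int.gcd n2 g : Int))
    else decide (n = 1)

def is_smooth_over_prod (n : Int) (k : Int) : Bool :=
  pvLoopA (n.natAbs + 1) n ((Int.gcd n k : Int))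

-- ===== PORT B =====
-- while n != 1: g = gcd(n, k); if g <= 1: return False; n //= g;  return True
def pvLoopB : Nat → Int → Int → Bool
  | 0, _, _ => false
  | f+1, n, k =>
    if n ≠ 1 then
      if ((Int.gcd n k : Int)) ≤ 1 then false
      else pvLoopB f (PySem.Int.floordiv n ((Int.gcd n k : Int))) k
    else true

def is_smooth_over_prod_alt (n : Int) (k : Int) : Bool :=
  pvLoopB (n.natAbs + 1) n k

-- ===== PRECONDITION & SPEC =====
-- Pre_ excludes exactly n = 0 with |k| > 1, where the Python A (and B) loops forever.
def Pre_is_smooth_over_prod (n : Int) (k : Int) : Prop := n ≠ 0 ∨ k.natAbs ≤ 1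
instance (n : Int) (k : Int) : Decidable (Pre_is_smooth_over_prod n k) := by
  unfold Pre_is_smooth_over_prod; infer_instance

def pvWitness_is_smooth_over_prod : Int × Int := (12, 6)

def Spec_is_smooth_over_prod (n : Int) (k : Int) (out : Bool) : Prop := out = is_smooth_over_prod_alt n k
instance (n : Int) (k : Int) (out : Bool) : Decidable (Spec_is_smooth_over_prod n k out) := by unfold Spec_is_smooth_over_prod; infer_instance

-- ===== CLAIM (what is proved, stated in full; the proofs are below) =====
def Claim_equal_is_smooth_over_prod : Prop := ∀ (n : Int) (k : Int), Dom_is_smooth_over_prod n k → Pre_is_smooth_over_prod n k → Spec_is_smooth_over_prod n k (is_smooth_over_prod n k)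

-- ===== LEMMAS AND PROOFS =====

-- "every prime factor of n divides k": the property both loops decide (for n ≥ 1)
def pvSmooth (n : Int) (k : Int) : Prop :=
  ∀ p : Nat, p.Prime → (p : Int) ∣ n → (p : Int) ∣ k

lemma pvSmooth_one (k : Int) : pvSmooth 1 k := by
  intro p hp hpd
  have h1 := Int.le_of_dvd one_pos hpd
  have h2 := hp.two_le
  exact absurd h1 (by exact_mod_cast by omega)

lemma pv_natCast_dvd {p : Nat} {n : Int} : (p : Int) ∣ n ↔ p ∣ n.natAbs :=
  ⟨fun h => Int.natCast_dvd_natCast.mp (Int.dvd_natAbs.mpr h),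
   fun h => Int.dvd_natAbs.mp (Int.natCast_dvd_natCast.mpr h)⟩

lemma pv_dvd_floordiv_mul {n g : Int} (_hg : 0 < g) (hdvd : g ∣ n) :
    PySem.Int.floordiv n g * g = n := by
  have h := PySem.Int.floordiv_mul_add_mod n g
  have hm : PySem.Int.mod n g = 0 := (PySem.Int.mod_eq_zero_iff_dvd n g).mpr hdvd
  omega

lemma pv_quot_pos {q g n : Int} (hg : 2 ≤ g) (hmul : q * g = n) (hn : 1 ≤ n) : 1 ≤ q := by
  by_contra h
  push_neg at h
  nlinarith

lemma pv_quot_neg {q g n : Int} (hg : 2 ≤ g) (hmul : q * g = n) (hn : n ≤ -1) : q ≤ -1 := by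
  by_contra h
  push_neg at h
  nlinarith

lemma pv_floordiv_neg {n g : Int} (hn : n ≤ -1) (hg : 2 ≤ g) :
    PySem.Int.floordiv n g ≤ -1 := by
  have h := PySem.Int.floordiv_mul_add_mod n g
  have h1 := PySem.Int.mod_nonneg n (b := g) (by omega)
  have h2 := PySem.Int.mod_lt n (b := g) (by omega)
  by_contra hq
  push_neg at hq
  nlinarith

lemma pv_strip_neg (g : Int) (hg : 2 ≤ g) :
    ∀ (f : Nat) (n : Int), n ≤ -1 → pvStripA g f n ≤ -1 := by
  intro f
  induction f with
  | zero => intro n hn; simpa [pvStripA] using hn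
  | succ f ih =>
    intro n hn
    simp only [pvStripA]
    split
    · rename_i h
      have hdvd : g ∣ n := (PySem.Int.mod_eq_zero_iff_dvd n g).mp h
      have hmul := pv_dvd_floordiv_mul (by omega) hdvd
      exact ih _ (pv_quot_neg hg hmul hn)
    · exact hn

lemma pv_strip_factor (g : Int) (hg : 2 ≤ g) :
    ∀ (f : Nat) (n : Int), 1 ≤ n →
      ∃ t : Nat, n = pvStripA g f n * g ^ t ∧ 1 ≤ pvStripA g f n := by
  intro f
  induction f with
  | zero => intro n hn; exact ⟨0, by simp [pvStripA], by simpa [pvStripA] using hn⟩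
  | succ f ih =>
    intro n hn
    simp only [pvStripA]
    split
    · rename_i h
      have hdvd : g ∣ n := (PySem.Int.mod_eq_zero_iff_dvd n g).mp h
      have hmul := pv_dvd_floordiv_mul (by omega) hdvd
      obtain ⟨t, ht, hpos⟩ := ih _ (pv_quot_pos hg hmul hn)
      refine ⟨t + 1, ?_, hpos⟩
      calc n = PySem.Int.floordiv n g * g := hmul.symm
        _ = pvStripA g f (PySem.Int.floordiv n g) * g ^ t * g := by conv_lhs => rw [ht]
        _ = pvStripA g f (PySem.Int.floordiv n g) * g ^ (t + 1) := by ring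
    · exact ⟨0, by simp, hn⟩

lemma pv_loopA_neg : ∀ (f : Nat) (n g : Int), n ≤ -1 → pvLoopA f n g = false := by
  intro f
  induction f with
  | zero => intro n g hn; simp [pvLoopA]; omega
  | succ f ih =>
    intro n g hn
    simp only [pvLoopA]
    split
    · rename_i hg
      have h1 : PySem.Int.floordiv n g ≤ -1 := pv_floordiv_neg hn (by omega)
      have h2 : pvStripA g (f+1) (PySem.Int.floordiv n g) ≤ -1 :=
        pv_strip_neg g (by omega) _ _ h1
      rw [if_neg (by omega)]
      exact ih _ _ h2
    · simp; omega

lemma pv_loopB_neg (k : Int) : ∀ (f : Nat) (n : Int), n ≤ -1 → pvLoopB f n k = false := by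
  intro f
  induction f with
  | zero => intro n hn; simp [pvLoopB]
  | succ f ih =>
    intro n hn
    simp only [pvLoopB]
    rw [if_pos (by omega)]
    split
    · rfl
    · rename_i hg
      push_neg at hg
      exact ih _ (pv_floordiv_neg hn (by omega))

lemma pv_loopB_pos (k : Int) :
    ∀ (N : Nat) (n : Int) (f : Nat), n.natAbs ≤ N → 1 ≤ n → n.natAbs ≤ f →
      (pvLoopB f n k = true ↔ pvSmooth n k) := by
  intro N
  induction N with
  | zero => intro n f h1 h2 _; omega
  | succ N ih =>
    intro n f hN hn hf
    obtain ⟨f', rfl⟩ : ∃ f', f = f' + 1 := ⟨f - 1, by omega⟩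
    by_cases h1 : n = 1
    · subst h1
      simpa [pvLoopB] using pvSmooth_one k
    · have hn2 : 2 ≤ n := by omega
      simp only [pvLoopB, if_pos (show n ≠ 1 from h1)]
      by_cases hg : ((Int.gcd n k : Int)) ≤ 1
      · rw [if_pos hg]
        simp only [Bool.false_eq_true, false_iff]
        intro hs
        obtain ⟨p, hp, hpd⟩ := Nat.exists_prime_and_dvd (n := n.natAbs) (by omega)
        have hpn : (p : Int) ∣ n := pv_natCast_dvd.mpr hpd
        have hdg : p ∣ Int.gcd n k := Int.dvd_gcd hpn (hs p hp hpn)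
        have hgpos : Int.gcd n k ≠ 0 := by
          simp [Int.gcd_eq_zero_iff]
          omega
        have : Int.gcd n k = 1 := by omega
        rw [this] at hdg
        exact hp.one_lt.ne' (Nat.dvd_one.mp hdg)
      · rw [if_neg hg]
        push_neg at hg
        have hg2 : (2 : Int) ≤ (Int.gcd n k : Int) := by omega
        have hdvd : ((Int.gcd n k : Int)) ∣ n := Int.gcd_dvd_left n k
        have hmul := pv_dvd_floordiv_mul (by omega) hdvd
        set q := PySem.Int.floordiv n ((Int.gcd n k : Int)) with hq
        have hq1 : 1 ≤ q := pv_quot_pos hg2 hmul hn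
        have hqn : q < n := by nlinarith
        rw [ih q f' (by omega) hq1 (by omega)]
        constructor
        · intro hs p hp hpn
          have hpn' : (p : Int) ∣ q * ((Int.gcd n k : Int)) := by rw [hmul]; exact hpn
          rcases Int.Prime.dvd_mul hp hpn' with h | h
          · exact hs p hp (pv_natCast_dvd.mpr h)
          · have : (p : Int) ∣ ((Int.gcd n k : Int)) := pv_natCast_dvd.mpr (by simpa using h)
            exact this.trans (Int.gcd_dvd_right n k)
        · intro hs p hp hpq
          exact hs p hp (hpq.trans ⟨((Int.gcd n k : Int)), hmul.symm⟩)

lemma pv_loopA_pos (k : Int) :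
    ∀ (N : Nat) (n : Int) (g : Nat) (f : Nat), n.natAbs ≤ N → 1 ≤ n →
      ((g : Int) ∣ n) →
      (∀ p : Nat, p.Prime → (p ∣ g ↔ ((p : Int) ∣ n ∧ (p : Int) ∣ k))) →
      n.natAbs ≤ f →
      (pvLoopA f n (g : Int) = true ↔ pvSmooth n k) := by
  intro N
  induction N with
  | zero => intro n g f h1 h2 _ _ _; omega
  | succ N ih =>
    intro n g f hN hn hdvd hinv hf
    obtain ⟨f', rfl⟩ : ∃ f', f = f' + 1 := ⟨f - 1, by omega⟩
    simp only [pvLoopA]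
    by_cases hg2 : (1 : Int) < (g : Int)
    · rw [if_pos hg2]
      have hg2' : (2 : Int) ≤ (g : Int) := by omega
      have hmul := pv_dvd_floordiv_mul (by omega) hdvd
      set q := PySem.Int.floordiv n (g : Int) with hqdef
      have hq1 : 1 ≤ q := pv_quot_pos hg2' hmul hn
      obtain ⟨t, ht, hm1⟩ := pv_strip_factor (g : Int) hg2' (f' + 1) q hq1
      set m := pvStripA (g : Int) (f' + 1) q with hmdef
      have hnm : n = m * (g : Int) ^ (t + 1) := by rw [← hmul, ht]; ring
      have hmdvdn : m ∣ n := ⟨(g : Int) ^ (t + 1), hnm⟩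
      have hiff : pvSmooth m k ↔ pvSmooth n k := by
        constructor
        · intro hs p hp hpn
          rw [hnm] at hpn
          rcases Int.Prime.dvd_mul hp hpn with h | h
          · exact hs p hp (pv_natCast_dvd.mpr h)
          · have hpg : (p : Int) ∣ (g : Int) :=
              Int.Prime.dvd_pow' hp (pv_natCast_dvd.mpr h)
            exact ((hinv p hp).mp (Int.natCast_dvd_natCast.mp hpg)).2
        · intro hs p hp hpm
          exact hs p hp (hpm.trans hmdvdn)
      by_cases hm : m = 1
      · rw [if_pos hm]
        simp only [true_iff]
        exact hiff.mp (hm ▸ pvSmooth_one k)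
      · rw [if_neg hm]
        have hqn : q < n := by nlinarith
        have hmq : m ≤ q := Int.le_of_dvd (by omega) ⟨(g : Int) ^ t, ht⟩
        have e : Int.gcd m (g : Int) = Nat.gcd m.natAbs g := by simp [Int.gcd]
        rw [ih m (Int.gcd m (g : Int)) f' (by omega) hm1 (Int.gcd_dvd_left m (g : Int))
          (by
            intro p hp
            rw [e, Nat.dvd_gcd_iff]
            constructor
            · rintro ⟨h1, h2⟩
              exact ⟨pv_natCast_dvd.mpr h1, ((hinv p hp).mp h2).2⟩
            · rintro ⟨h1, h2⟩
              exact ⟨pv_natCast_dvd.mp h1, (hinv p hp).mpr ⟨h1.trans hmdvdn, h2⟩⟩)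
          (by omega)]
        exact hiff
    · rw [if_neg hg2]
      have hg0 : g ≠ 0 := by
        rintro rfl
        simp at hdvd
        omega
      have hg1 : g = 1 := by omega
      by_cases h1 : n = 1
      · subst h1
        simpa using pvSmooth_one k
      · rw [decide_eq_false h1]
        simp only [Bool.false_eq_true, false_iff]
        intro hs
        obtain ⟨p, hp, hpd⟩ := Nat.exists_prime_and_dvd (n := n.natAbs) (by omega)
        have hpn : (p : Int) ∣ n := pv_natCast_dvd.mpr hpd
        have := (hinv p hp).mpr ⟨hpn, hs p hp hpn⟩
        rw [hg1] at this
        exact hp.one_lt.ne' (Nat.dvd_one.mp this)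

-- ===== VERDICT (by name: the statement is the Claim_ definition above) =====
theorem is_smooth_over_prod_spec : Claim_equal_is_smooth_over_prod := by
  intro n k _ hpre
  unfold Spec_is_smooth_over_prod is_smooth_over_prod is_smooth_over_prod_alt
  rcases lt_trichotomy n 0 with hlt | heq | hgt
  · rw [pv_loopA_neg _ _ _ (by omega), pv_loopB_neg _ _ _ (by omega)]
  · subst heq
    rcases hpre with h | h
    · omega
    · have e : Int.gcd 0 k = k.natAbs := by simp [Int.gcd]
      simp only [Int.natAbs_zero, zero_add, pvLoopA, pvLoopB, e]
      rw [if_neg (by omega : ¬ (1 : Int) < (k.natAbs : Int)),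
        if_pos (by omega : (0 : Int) ≠ 1), if_pos (by omega : ((k.natAbs : Int)) ≤ 1)]
      simp
  · have hn : 1 ≤ n := hgt
    have hA := pv_loopA_pos k n.natAbs n (Int.gcd n k) (n.natAbs + 1) (le_refl _) hn
      (Int.gcd_dvd_left n k)
      (by
        intro p hp
        constructor
        · intro hpg
          have h1 : (p : Int) ∣ (Int.gcd n k : Int) := Int.natCast_dvd_natCast.mpr hpg
          exact ⟨h1.trans (Int.gcd_dvd_left n k), h1.trans (Int.gcd_dvd_right n k)⟩
        · rintro ⟨h1, h2⟩
          exact Int.dvd_gcd h1 h2)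
      (by omega)
    have hB := pv_loopB_pos k n.natAbs n (n.natAbs + 1) (le_refl _) hn (by omega)
    rw [Bool.eq_iff_iff, hA, hB]
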